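-- pv_equiv track=rewrite | github.com/Bloodmallet/simc_support | simc_support/game_data/SimcObject.py | convert_to_simc_string
-- ===== SOURCE A (Python) =====
-- def convert_to_simc_string(normal_string: str) -> str:
--     """Converts a normal name into a simc_name.
--
--     Args:
--         normal_string (str): "My Awesome'st Name Ever"
--
--     Returns:
--         str: "my_awesomest_name_ever"
--     """
--     simc_name = normal_string.lower()
--     cleansers = (
--         (" ", "_"),
--         ("-", ""),
--         ("'", ""),
--         (":", ""),
--         (",", ""),
--     )
--
--     for cleanser in cleansers:
--         simc_name = simc_name.replace(*cleanser)
--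
--     return simc_name
-- ===== SOURCE B (Python) =====
-- def convert_to_simc_string(normal_string: str) -> str:
--     """Single pass: lower-case once, then map each character (space -> '_',
--     drop - ' : , , keep the rest) into an output buffer."""
--     out = []
--     for ch in normal_string.lower():
--         if ch == ' ':
--             out.append('_')
--         elif ch in "-':,":
--             pass
--         else:
--             out.append(ch)
--     return ''.join(out)
-- ===== Notes on version B (the rewrite author's own statement) =====
-- stated objective: idiomatic
-- what changed: Replaces five sequential whole-string .replace passes with a single character-by-character pass that builds the output in one buffer.
import Mathlib
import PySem

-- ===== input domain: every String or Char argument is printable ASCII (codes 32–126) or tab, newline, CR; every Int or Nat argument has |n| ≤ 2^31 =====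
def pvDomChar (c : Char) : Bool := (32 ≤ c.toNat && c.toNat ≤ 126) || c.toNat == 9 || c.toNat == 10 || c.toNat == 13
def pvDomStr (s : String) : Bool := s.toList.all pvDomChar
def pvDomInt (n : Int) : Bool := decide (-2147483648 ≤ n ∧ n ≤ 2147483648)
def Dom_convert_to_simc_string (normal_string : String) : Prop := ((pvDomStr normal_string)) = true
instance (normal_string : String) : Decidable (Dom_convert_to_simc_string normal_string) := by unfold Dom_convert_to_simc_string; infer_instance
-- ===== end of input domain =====

-- B replaces A's five sequential whole-string replace passes with one character pass building an output buffer (idiomatic; return value only).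


-- ===== PORT A =====
-- five sequential replace passes, as in the Python loop over `cleansers`
def convert_to_simc_string (normal_string : String) : String :=
  let simc_name := PySem.Str.lower normal_string
  let simc_name := PySem.Str.replace simc_name " " "_"
  let simc_name := PySem.Str.replace simc_name "-" ""
  let simc_name := PySem.Str.replace simc_name "'" ""
  let simc_name := PySem.Str.replace simc_name ":" ""
  let simc_name := PySem.Str.replace simc_name "," ""
  simc_name

-- ===== PORT B =====
-- one pass over the lower-cased characters, appending into an output buffer
def convert_to_simc_string_alt (normal_string : String) : String :=
  String.ofList ((PySem.Chars.lower normal_string.toList).foldl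
    (fun out ch =>
      if ch = ' ' then out ++ ['_']
      else if ch ∈ ("-':,".toList) then out
      else out ++ [ch]) [])

-- ===== PRECONDITION & SPEC =====
def Spec_convert_to_simc_string (normal_string : String) (out : String) : Prop := out = convert_to_simc_string_alt normal_string
instance (normal_string : String) (out : String) : Decidable (Spec_convert_to_simc_string normal_string out) := by unfold Spec_convert_to_simc_string; infer_instance

-- ===== CLAIM (what is proved, stated in full; the proofs are below) =====
def Claim_equal_convert_to_simc_string : Prop := ∀ (normal_string : String), Dom_convert_to_simc_string normal_string → Spec_convert_to_simc_string normal_string (convert_to_simc_string normal_string)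

-- ===== LEMMAS AND PROOFS =====

-- substituting a single character is a flatMap over the characters
def pvSubst (o : Char) (new : List Char) (cs : List Char) : List Char :=
  cs.flatMap (fun c => if c = o then new else [c])

theorem pvGo_single (o : Char) (new : List Char) :
    ∀ (fuel : Nat) (l acc : List Char), l.length ≤ fuel →
      PySem.Chars.replace.go [o] new fuel l acc = acc.reverse ++ pvSubst o new l := by
  intro fuel
  induction fuel with
  | zero =>
    intro l acc h
    have : l = [] := List.length_eq_zero_iff.mp (Nat.le_zero.mp h)
    subst this
    simp [PySem.Chars.replace.go, pvSubst]
  | succ n ih =>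
    intro l acc h
    cases l with
    | nil => simp [PySem.Chars.replace.go, pvSubst]
    | cons c t =>
      by_cases hc : o = c
      · subst hc
        have := ih t (new.reverse ++ acc) (by simpa using Nat.le_of_succ_le_succ h)
        simp [PySem.Chars.replace.go, List.isPrefixOf, this, pvSubst]
      · have := ih t (c :: acc) (by simpa using Nat.le_of_succ_le_succ h)
        simp [PySem.Chars.replace.go, List.isPrefixOf, hc, this, pvSubst,
              Ne.symm hc]

theorem pvReplace_single (o : Char) (new cs : List Char) :
    PySem.Chars.replace cs [o] new = pvSubst o new cs := by
  simpa [PySem.Chars.replace] using pvGo_single o new cs.length cs [] le_rfl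

-- the composed per-character action of the five passes
def pvStep (c : Char) : List Char :=
  if c = ' ' then ['_']
  else if c = '-' ∨ c = '\'' ∨ c = ':' ∨ c = ',' then []
  else [c]

theorem pvSubst_append (o : Char) (new xs ys : List Char) :
    pvSubst o new (xs ++ ys) = pvSubst o new xs ++ pvSubst o new ys := by
  simp [pvSubst]

theorem pvChain_eq (cs : List Char) :
    pvSubst ',' [] (pvSubst ':' [] (pvSubst '\'' [] (pvSubst '-' []
      (pvSubst ' ' ['_'] cs)))) = cs.flatMap pvStep := by
  induction cs with
  | nil => simp [pvSubst]
  | cons c t ih =>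
    have hc : (c :: t) = [c] ++ t := rfl
    rw [hc]
    simp only [pvSubst_append, List.flatMap_append]
    rw [ih]
    congr 1
    by_cases h1 : c = ' '
    · subst h1; decide
    by_cases h2 : c = '-'
    · subst h2; decide
    by_cases h3 : c = '\''
    · subst h3; decide
    by_cases h4 : c = ':'
    · subst h4; decide
    by_cases h5 : c = ','
    · subst h5; decide
    simp [pvSubst, pvStep, h1, h2, h3, h4, h5]

theorem pvFold_eq (cs : List Char) :
    (cs.foldl (fun out ch =>
      if ch = ' ' then out ++ ['_']
      else if ch ∈ ("-':,".toList) then out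
      else out ++ [ch]) []) = cs.flatMap pvStep := by
  have h : ∀ (out : List Char) (ch : Char),
      (if ch = ' ' then out ++ ['_']
       else if ch ∈ ("-':,".toList) then out
       else out ++ [ch]) = out ++ pvStep ch := by
    intro out ch
    by_cases h1 : ch = ' '
    · simp [h1, pvStep]
    · by_cases h2 : ch ∈ ("-':,".toList)
      · have : ch = '-' ∨ ch = '\'' ∨ ch = ':' ∨ ch = ',' := by
          simpa using h2
        simp [pvStep, h1, this]
      · have : ¬ (ch = '-' ∨ ch = '\'' ∨ ch = ':' ∨ ch = ',') := by
          simpa using h2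
        simp [pvStep, h1, this]
  calc (cs.foldl (fun out ch =>
          if ch = ' ' then out ++ ['_']
          else if ch ∈ ("-':,".toList) then out
          else out ++ [ch]) [])
      = cs.foldl (fun out ch => out ++ pvStep ch) [] := by
        exact PySem.List.foldl_congr_mem cs _ _ [] (fun acc x _ => h acc x)
    _ = cs.flatMap pvStep := by
        simpa using PySem.List.foldl_append_eq_flatMap pvStep cs []

-- ===== VERDICT (by name: the statement is the Claim_ definition above) =====
theorem convert_to_simc_string_spec : Claim_equal_convert_to_simc_string := by
  intro s _
  unfold Spec_convert_to_simc_string convert_to_simc_string convert_to_simc_string_alt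
  apply String.toList_inj.mp  -- equal character lists give equal strings
  simp only [String.toList_ofList]
  rw [pvFold_eq]
  simp only [PySem.Str.toList_replace, PySem.Str.toList_lower]
  rw [show (" ".toList) = [' '] from rfl, show ("_".toList) = ['_'] from rfl,
      show ("-".toList) = ['-'] from rfl, show ("'".toList) = ['\''] from rfl,
      show (":".toList) = [':'] from rfl, show (",".toList) = [','] from rfl,
      show ("".toList) = ([] : List Char) from rfl]
  rw [pvReplace_single, pvReplace_single, pvReplace_single, pvReplace_single,
      pvReplace_single]
  exact pvChain_eq _
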